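-- pv_equiv track=rewrite | github.com/khaneliman/nixpkgs | pkgs/applications/editors/vim/plugins/outdated.py | group_plugins
-- ===== SOURCE A (Python) =====
-- def group_plugins(plugins):
--     vim_plugins = []
--     nvim_plugins = []
--     unknown_plugins = []
--
--     for plugin in plugins:
--         name, pname, version = plugin
--         if 'nvim' in pname.lower():
--             nvim_plugins.append(plugin)
--         elif 'vim' in pname.lower():
--             vim_plugins.append(plugin)
--         else:
--             unknown_plugins.append(plugin)
--
--     return vim_plugins, nvim_plugins, unknown_plugins
-- ===== SOURCE B (Python) =====
-- def classify(plugin):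
--     name, pname, version = plugin
--     if 'nvim' in pname.lower():
--         return 'nvim'
--     if 'vim' in pname.lower():
--         return 'vim'
--     return 'unknown'
--
--
-- def group_plugins(plugins):
--     plugins = list(plugins)
--     vim_plugins = [p for p in plugins if classify(p) == 'vim']
--     nvim_plugins = [p for p in plugins if classify(p) == 'nvim']
--     unknown_plugins = [p for p in plugins if classify(p) == 'unknown']
--     return vim_plugins, nvim_plugins, unknown_plugins
-- ===== Notes on version B (the rewrite author's own statement) =====
-- stated objective: alternative
-- what changed: Replaced the single loop that appends to three accumulator lists with a classify(plugin) helper and three independent filtering passes, one per group.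
import Mathlib
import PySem

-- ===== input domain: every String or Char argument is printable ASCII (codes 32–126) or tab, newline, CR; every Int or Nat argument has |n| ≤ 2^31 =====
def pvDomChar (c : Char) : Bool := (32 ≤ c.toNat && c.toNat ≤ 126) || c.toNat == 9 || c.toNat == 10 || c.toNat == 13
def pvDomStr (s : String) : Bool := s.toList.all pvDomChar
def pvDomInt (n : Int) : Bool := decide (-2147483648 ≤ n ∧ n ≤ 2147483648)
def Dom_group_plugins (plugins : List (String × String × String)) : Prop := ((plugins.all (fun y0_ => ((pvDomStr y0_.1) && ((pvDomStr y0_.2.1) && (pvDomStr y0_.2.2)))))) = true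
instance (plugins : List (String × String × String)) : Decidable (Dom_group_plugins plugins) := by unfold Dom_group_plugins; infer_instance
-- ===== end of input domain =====

-- B replaces A's single three-accumulator loop with a classify helper and three filtering passes (objective: alternative decomposition).

-- ===== PORT A =====
-- A: one loop appending each plugin to one of three accumulator lists.
def group_plugins (plugins : List (String × String × String)) : (List (String × String × String)) × (List (String × String × String)) × (List (String × String × String)) :=
  let st := plugins.foldl
    (fun (acc : (List (String × String × String)) × (List (String × String × String)) × (List (String × String × String))) plugin =>
      if PySem.Str.isIn "nvim" (PySem.Str.lower plugin.2.1) then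
        (acc.1, acc.2.1 ++ [plugin], acc.2.2)
      else if PySem.Str.isIn "vim" (PySem.Str.lower plugin.2.1) then
        (acc.1 ++ [plugin], acc.2.1, acc.2.2)
      else
        (acc.1, acc.2.1, acc.2.2 ++ [plugin]))
    ([], [], [])
  (st.1, st.2.1, st.2.2)

-- ===== PORT B =====
def classifyPlugin (plugin : String × String × String) : String :=
  if PySem.Str.isIn "nvim" (PySem.Str.lower plugin.2.1) then "nvim"
  else if PySem.Str.isIn "vim" (PySem.Str.lower plugin.2.1) then "vim"
  else "unknown"

def group_plugins_alt (plugins : List (String × String × String)) : (List (String × String × String)) × (List (String × String × String)) × (List (String × String × String)) :=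
  let vim_plugins := plugins.filter (fun p => classifyPlugin p == "vim")
  let nvim_plugins := plugins.filter (fun p => classifyPlugin p == "nvim")
  let unknown_plugins := plugins.filter (fun p => classifyPlugin p == "unknown")
  (vim_plugins, nvim_plugins, unknown_plugins)

-- ===== PRECONDITION & SPEC =====
def Spec_group_plugins (plugins : List (String × String × String)) (out : (List (String × String × String)) × (List (String × String × String)) × (List (String × String × String))) : Prop := out = group_plugins_alt plugins
instance (plugins : List (String × String × String)) (out : (List (String × String × String)) × (List (String × String × String)) × (List (String × String × String))) : Decidable (Spec_group_plugins plugins out) := by unfold Spec_group_plugins; infer_instance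

-- ===== CLAIM (what is proved, stated in full; the proofs are below) =====
def Claim_equal_group_plugins : Prop := ∀ (plugins : List (String × String × String)), Dom_group_plugins plugins → Spec_group_plugins plugins (group_plugins plugins)


-- ===== LEMMAS AND PROOFS =====
-- Invariant of A's loop: the fold appends, to each starting accumulator, exactly the filter B computes.
theorem group_plugins_foldl_inv (l : List (String × String × String))
    (v n u : List (String × String × String)) :
    l.foldl
      (fun (acc : (List (String × String × String)) × (List (String × String × String)) × (List (String × String × String))) plugin =>
        if PySem.Str.isIn "nvim" (PySem.Str.lower plugin.2.1) then
          (acc.1, acc.2.1 ++ [plugin], acc.2.2)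
        else if PySem.Str.isIn "vim" (PySem.Str.lower plugin.2.1) then
          (acc.1 ++ [plugin], acc.2.1, acc.2.2)
        else
          (acc.1, acc.2.1, acc.2.2 ++ [plugin]))
      (v, n, u)
    = (v ++ l.filter (fun p => classifyPlugin p == "vim"),
       n ++ l.filter (fun p => classifyPlugin p == "nvim"),
       u ++ l.filter (fun p => classifyPlugin p == "unknown")) := by
  induction l generalizing v n u with
  | nil => simp
  | cons p t ih =>
    by_cases h1 : PySem.Str.isIn "nvim" (PySem.Str.lower p.2.1) = true
    · simp only [List.foldl_cons, List.filter_cons, classifyPlugin, h1, if_true]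
      rw [ih]
      simp [classifyPlugin]
    · by_cases h2 : PySem.Str.isIn "vim" (PySem.Str.lower p.2.1) = true
      · simp only [List.foldl_cons, List.filter_cons, classifyPlugin, h1, h2,
          Bool.false_eq_true, if_false, if_true]
        rw [ih]
        simp [classifyPlugin]
      · simp only [List.foldl_cons, List.filter_cons, classifyPlugin, h1, h2,
          Bool.false_eq_true, if_false]
        rw [ih]
        simp [classifyPlugin]

theorem group_plugins_spec : Claim_equal_group_plugins := by
  intro plugins _
  show group_plugins plugins = group_plugins_alt plugins
  unfold group_plugins group_plugins_alt
  rw [group_plugins_foldl_inv]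
  simp
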